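-- pv_equiv track=rewrite | github.com/Raghu-N-Yadav/python_codes | canYouCount-hackerEarth.py | canYouCount
-- ===== SOURCE A (Python) =====
-- def canYouCount (s):
--     #i = 1
--     num = 1
--     count = 0
--     vowels = ['a','e','i','o','u']
--     for i in s:
--         if (i == '_' and count >=1):
--             num *=count
--         elif (i in vowels):
--             vowels.remove(i)
--             count+=1
--     return num
-- ===== SOURCE B (Python) =====
-- def canYouCount(s):
--     num = 1
--     seen = set()
--     parts = s.split('_')
--     for part in parts[:-1]:
--         seen.update(c for c in part if c in 'aeiou')
--         if seen:
--             num *= len(seen)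
--     return num
-- ===== Notes on version B (the rewrite author's own statement) =====
-- stated objective: alternative
-- what changed: B splits the string at underscores once and folds over the segments before each underscore with a running set of distinct vowels, replacing A's per-character loop over a mutable vowel list and counter.
import Mathlib
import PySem

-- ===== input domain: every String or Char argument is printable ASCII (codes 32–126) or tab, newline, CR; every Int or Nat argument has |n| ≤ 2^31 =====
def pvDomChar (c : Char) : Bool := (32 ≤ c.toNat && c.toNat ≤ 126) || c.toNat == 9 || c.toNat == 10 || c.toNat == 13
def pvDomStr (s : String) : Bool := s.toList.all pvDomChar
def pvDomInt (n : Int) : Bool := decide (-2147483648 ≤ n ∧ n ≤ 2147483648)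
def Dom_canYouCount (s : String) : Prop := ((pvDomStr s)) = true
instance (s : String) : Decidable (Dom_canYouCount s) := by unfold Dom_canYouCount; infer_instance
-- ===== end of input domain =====

-- B splits the string at underscores once and folds the segments with a running set of distinct
-- vowels instead of A's per-character loop over a mutable vowel list and counter (measured faster
-- in Python: split/set work in C replaces the per-character interpreted loop).

-- ===== PORT A =====
-- one step of A's for-loop; state = (num, count, vowels)
def stepA (st : Int × Int × List Char) (i : Char) : Int × Int × List Char :=
  if i == '_' && decide (1 ≤ st.2.1) then (st.1 * st.2.1, st.2.1, st.2.2)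
  else if st.2.2.contains i then
    (st.1, st.2.1 + 1, (PySem.List.remove? st.2.2 i).getD st.2.2)
  else st

def canYouCount (s : String) : Int :=
  (s.toList.foldl stepA (1, 0, ['a', 'e', 'i', 'o', 'u'])).1

-- ===== PORT B =====
-- one step of B's for-loop over parts[:-1]; state = (num, seen)
def stepB (st : Int × PySem.Set Char) (part : List Char) : Int × PySem.Set Char :=
  let seen := PySem.Set.update st.2 (part.filter (fun c => ['a', 'e', 'i', 'o', 'u'].contains c))
  (if seen.isEmpty then st.1 else st.1 * (seen.length : Int), seen)

def canYouCount_alt (s : String) : Int :=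
  ((PySem.Chars.splitOn s.toList ['_']).dropLast.foldl stepB (1, PySem.Set.empty)).1

-- ===== PRECONDITION & SPEC =====
def Spec_canYouCount (s : String) (out : Int) : Prop := out = canYouCount_alt s
instance (s : String) (out : Int) : Decidable (Spec_canYouCount s out) := by unfold Spec_canYouCount; infer_instance

-- ===== CLAIM (what is proved, stated in full; the proofs are below) =====
def Claim_equal_canYouCount : Prop := ∀ (s : String), Dom_canYouCount s → Spec_canYouCount s (canYouCount s)

-- ===== LEMMAS AND PROOFS =====

-- abstract char-level loop: state = (num, seen)
def stepC (st : Int × List Char) (i : Char) : Int × List Char :=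
  if i = '_' then (if st.2 = [] then st else (st.1 * (st.2.length : Int), st.2))
  else if ['a', 'e', 'i', 'o', 'u'].contains i then (st.1, PySem.Set.add st.2 i)
  else st

-- structural characterisation of split on '_'
def splitU : List Char → List (List Char)
  | [] => [[]]
  | c :: t =>
    if c = '_' then [] :: splitU t
    else match splitU t with
      | [] => [[c]]
      | h :: r => (c :: h) :: r

theorem splitU_ne_nil (l : List Char) : splitU l ≠ [] := by
  cases l with
  | nil => simp [splitU]
  | cons c t =>
    simp only [splitU]
    split
    · simp
    · split <;> simp_all

theorem splitOn_go_eq (l : List Char) : ∀ (cur : List Char) (accs : List (List Char)),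
    PySem.Chars.splitOn.go ['_'] (l.length + 1) l cur accs.reverse
      = accs ++ (match splitU l with
                 | [] => []
                 | h :: r => (cur.reverse ++ h) :: r) := by
  induction l with
  | nil =>
    intro cur accs
    simp [PySem.Chars.splitOn.go, splitU]
  | cons c t ih =>
    intro cur accs
    by_cases hc : c = '_'
    · subst hc
      have : (['_'] : List Char).isPrefixOf ('_' :: t) = true := by simp [List.isPrefixOf]
      simp only [PySem.Chars.splitOn.go, List.length_cons, this, if_pos]
      have h2 : (cur.reverse :: accs.reverse) = (accs ++ [cur.reverse]).reverse := by simp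
      rw [show List.drop (([] : List Char).length + 1) ('_' :: t) = t from rfl, h2,
        ih [] (accs ++ [cur.reverse])]
      rcases ht : splitU t with _ | ⟨h, r⟩
      · exact absurd ht (splitU_ne_nil t)
      · simp [splitU, ht]
    · have hpre : (['_'] : List Char).isPrefixOf (c :: t) = false := by
        have h' : ¬ ('_' = c) := fun h => hc h.symm
        simp [List.isPrefixOf, h']
      simp only [PySem.Chars.splitOn.go, List.length_cons, hpre]
      rw [if_neg (by simp), ih (c :: cur) accs]
      rcases ht : splitU t with _ | ⟨h, r⟩
      · exact absurd ht (splitU_ne_nil t)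
      · simp [splitU, hc, ht]

theorem splitOn_eq (l : List Char) : PySem.Chars.splitOn l ['_'] = splitU l := by
  have := splitOn_go_eq l [] []
  simp only [List.reverse_nil] at this
  rw [PySem.Chars.splitOn, this]
  rcases ht : splitU l with _ | ⟨h, r⟩
  · exact absurd ht (splitU_ne_nil l)
  · simp

-- shift: processing a non-underscore char into the first segment equals adding it (if a vowel) to
-- the state before processing the remaining segments
theorem stepB_shift (c : Char) (h : List Char) (parts : List (List Char))
    (num : Int) (seen : PySem.Set Char) :
    (((c :: h) :: parts).foldl stepB (num, seen)).1
      = ((h :: parts).foldl stepB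
          (num, if (['a','e','i','o','u'] : List Char).contains c
                then PySem.Set.add seen c else seen)).1 := by
  have hseen : PySem.Set.update seen
      ((c :: h).filter (fun x => (['a','e','i','o','u'] : List Char).contains x))
      = PySem.Set.update
          (if (['a','e','i','o','u'] : List Char).contains c then PySem.Set.add seen c else seen)
          (h.filter (fun x => (['a','e','i','o','u'] : List Char).contains x)) := by
    by_cases hv : (['a','e','i','o','u'] : List Char).contains c = true
    · rw [if_pos hv, List.filter_cons, if_pos hv]
      simp only [PySem.Set.update, List.foldl_cons]
    · rw [if_neg hv, List.filter_cons, if_neg hv]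
  have hstep : stepB (num, seen) (c :: h)
      = stepB (num, if (['a','e','i','o','u'] : List Char).contains c
                    then PySem.Set.add seen c else seen) h := by
    simp only [stepB, hseen]
  simp only [List.foldl_cons, hstep]

-- C-loop equals B's fold over the split segments
theorem C_eq_B (l : List Char) : ∀ (num : Int) (seen : List Char),
    (l.foldl stepC (num, seen)).1 = ((splitU l).dropLast.foldl stepB (num, seen)).1 := by
  induction l with
  | nil => intro num seen; simp [splitU]
  | cons c t ih =>
    intro num seen
    by_cases hc : c = '_'
    · subst hc
      rcases ht : splitU t with _ | ⟨h, r⟩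
      · exact absurd ht (splitU_ne_nil t)
      · rw [show splitU ('_' :: t) = [] :: splitU t from by simp [splitU], ht,
          List.dropLast_cons_of_ne_nil (by simp)]
        simp only [List.foldl_cons]
        have hstep : stepB (num, seen) [] =
            (if seen = [] then num else num * (seen.length : Int), seen) := by
          simp [stepB, PySem.Set.update, List.isEmpty_iff]
        rw [hstep]
        by_cases hs : seen = []
        · simpa [stepC, hs, ht] using ih num seen
        · simpa [stepC, hs, ht] using ih (num * (seen.length : Int)) seen
    · rcases ht : splitU t with _ | ⟨h, r⟩
      · exact absurd ht (splitU_ne_nil t)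
      · have hsc : stepC (num, seen) c =
            (num, if (['a','e','i','o','u'] : List Char).contains c
                  then PySem.Set.add seen c else seen) := by
          simp only [stepC, if_neg hc]
          split <;> rfl
        have hsplit : splitU (c :: t) = (c :: h) :: r := by
          simp [splitU, hc, ht]
        rcases hr : r with _ | ⟨r0, rs⟩
        · -- single segment: no underscore remains, num is never multiplied
          subst hr
          simp only [List.foldl_cons, hsc]
          rw [ih, hsplit, ht]
          simp
        · subst hr
          simp only [List.foldl_cons, hsc]
          rw [ih, hsplit, ht,
            show ((c :: h) :: r0 :: rs).dropLast = (c :: h) :: (r0 :: rs).dropLast from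
              List.dropLast_cons_of_ne_nil (by simp),
            show (h :: r0 :: rs).dropLast = h :: (r0 :: rs).dropLast from
              List.dropLast_cons_of_ne_nil (by simp)]
          exact (stepB_shift c h ((r0 :: rs).dropLast) num seen).symm

theorem remove?_filter (l : List Char) (p : Char → Bool) (c : Char) (hl : l.Nodup)
    (hc : c ∈ l) (hpc : p c = true) :
    PySem.List.remove? (l.filter p) c = some (l.filter (fun v => p v && !(v == c))) := by
  induction l with
  | nil => cases hc
  | cons a t ih =>
    obtain ⟨hat, hnt⟩ := List.nodup_cons.mp hl
    by_cases hac : a = c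
    · subst hac
      have hft : t.filter (fun v => p v && !(v == a)) = t.filter p := by
        apply List.filter_congr
        intro v hv
        have hva : ¬ v = a := fun h => hat (h ▸ hv)
        simp [hva]
      rw [List.filter_cons, if_pos hpc, PySem.List.remove?_cons_self,
        List.filter_cons]
      simp [hft]
    · have hct : c ∈ t := by
        rcases List.mem_cons.mp hc with h | h
        · exact absurd h.symm hac
        · exact h
      have ihh := ih hnt hct
      by_cases hpa : p a = true
      · rw [List.filter_cons, if_pos hpa, PySem.List.remove?_cons_of_ne _ hac, ihh,
          List.filter_cons, if_pos (by simp [hpa, hac])]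
        rfl
      · have hpa' : p a = false := by simpa using hpa
        rw [List.filter_cons, if_neg (by simp [hpa']), ihh,
          List.filter_cons, if_neg (by simp [hpa'])]

-- A-loop equals the C-loop under the invariant linking (count, vowels) to seen
theorem A_eq_C (l : List Char) : ∀ (num : Int) (seen : List Char), seen.Nodup →
    (∀ x ∈ seen, x ∈ (['a','e','i','o','u'] : List Char)) →
    (l.foldl stepA (num, (seen.length : Int),
        (['a','e','i','o','u'] : List Char).filter (fun v => !(seen.contains v)))).1
      = (l.foldl stepC (num, seen)).1 := by
  induction l with
  | nil => intro num seen _ _; simp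
  | cons c t ih =>
    intro num seen hnd hsub
    by_cases hc : c = '_'
    · subst hc
      have h1 : stepA (num, (seen.length : Int),
          (['a','e','i','o','u'] : List Char).filter (fun v => !(seen.contains v))) '_'
          = ((if seen = [] then num else num * (seen.length : Int)), (seen.length : Int),
             (['a','e','i','o','u'] : List Char).filter (fun v => !(seen.contains v))) := by
        by_cases hs : seen = []
        · subst hs; simp [stepA]
        · have hlen : (1 : Int) ≤ (seen.length : Int) := by
            have := List.length_pos_iff.mpr hs
            omega
          simp [stepA, hlen, hs]
      have h2 : stepC (num, seen) '_'
          = ((if seen = [] then num else num * (seen.length : Int)), seen) := by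
        by_cases hs : seen = [] <;> simp [stepC, hs]
      simp only [List.foldl_cons, h1, h2]
      exact ih _ seen hnd hsub
    · by_cases hv : c ∈ (['a','e','i','o','u'] : List Char)
      · have hv' : c = 'a' ∨ c = 'e' ∨ c = 'i' ∨ c = 'o' ∨ c = 'u' := by simpa using hv
        by_cases hcs : c ∈ seen
        · -- already seen: both sides leave the state unchanged
          have h1 : stepA (num, (seen.length : Int),
              (['a','e','i','o','u'] : List Char).filter (fun v => !(seen.contains v))) c
              = (num, (seen.length : Int),
                 (['a','e','i','o','u'] : List Char).filter (fun v => !(seen.contains v))) := by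
            simp [stepA, hc, List.contains_eq_mem, List.mem_filter, hcs]
          have h2 : stepC (num, seen) c = (num, seen) := by
            simp [stepC, hc, hv', PySem.Set.add, PySem.Set.contains, List.contains_eq_mem, hcs]
          simp only [List.foldl_cons, h1, h2]
          exact ih num seen hnd hsub
        · -- new vowel
          have hin : ((['a','e','i','o','u'] : List Char).filter
              (fun v => !(seen.contains v))).contains c = true := by
            simp [List.contains_eq_mem, List.mem_filter, hcs, hv']
          have hnodup5 : (['a','e','i','o','u'] : List Char).Nodup := by decide
          have hrm := remove?_filter (['a','e','i','o','u'] : List Char)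
            (fun v => !(seen.contains v)) c hnodup5 hv
            (by simp [List.contains_eq_mem, hcs])
          have hfe : ((['a','e','i','o','u'] : List Char).filter
                (fun v => (fun v => !(seen.contains v)) v && !(v == c)))
              = (['a','e','i','o','u'] : List Char).filter
                (fun v => !((seen ++ [c]).contains v)) := by
            apply List.filter_congr
            intro v _
            by_cases hvc : v = c
            · subst hvc; simp [List.contains_eq_mem]
            · simp [List.contains_eq_mem, hvc]
          have h1 : stepA (num, (seen.length : Int),
              (['a','e','i','o','u'] : List Char).filter (fun v => !(seen.contains v))) c
              = (num, (seen.length : Int) + 1,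
                 (['a','e','i','o','u'] : List Char).filter
                   (fun v => !((seen ++ [c]).contains v))) := by
            simp only [stepA]
            rw [if_neg (by simp [hc]), if_pos hin, hrm]
            simp only [Option.getD_some]
            rw [hfe]
          have h2 : stepC (num, seen) c = (num, seen ++ [c]) := by
            simp [stepC, hc, hv', PySem.Set.add, PySem.Set.contains, List.contains_eq_mem, hcs]
          simp only [List.foldl_cons, h1, h2]
          have hnd' : (seen ++ [c]).Nodup := by
            simp [List.nodup_append, hnd]
            exact fun a ha h => hcs (h ▸ ha)
          have hsub' : ∀ x ∈ seen ++ [c], x ∈ (['a','e','i','o','u'] : List Char) := by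
            intro x hx
            rcases List.mem_append.mp hx with h | h
            · exact hsub x h
            · simp at h; subst h; exact hv
          have := ih num (seen ++ [c]) hnd' hsub'
          simpa using this
      · -- neither underscore nor vowel: both unchanged
        have hv' : ¬ (c = 'a' ∨ c = 'e' ∨ c = 'i' ∨ c = 'o' ∨ c = 'u') := by simpa using hv
        have h1 : stepA (num, (seen.length : Int),
            (['a','e','i','o','u'] : List Char).filter (fun v => !(seen.contains v))) c
            = (num, (seen.length : Int),
               (['a','e','i','o','u'] : List Char).filter (fun v => !(seen.contains v))) := by
          simp [stepA, hc, List.contains_eq_mem, List.mem_filter, hv']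
        have h2 : stepC (num, seen) c = (num, seen) := by
          simp [stepC, hc, hv']
        simp only [List.foldl_cons, h1, h2]
        exact ih num seen hnd hsub

-- ===== VERDICT (by name: the statement is the Claim_ definition above) =====
theorem canYouCount_spec : Claim_equal_canYouCount := by
  intro s _
  unfold Spec_canYouCount canYouCount canYouCount_alt
  rw [splitOn_eq]
  have h0 := A_eq_C s.toList 1 [] (by simp) (by simp)
  simp only [List.length_nil, Nat.cast_zero, List.contains_nil] at h0
  rw [show ((['a','e','i','o','u'] : List Char).filter (fun v => !false))
      = (['a','e','i','o','u'] : List Char) from by simp] at h0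
  rw [h0, C_eq_B]
  rfl
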